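-- pv_equiv track=rewrite | github.com/Capital2/Big-M | service/UserInputSemanticValidation.py | UserInputSemanticValidation
-- ===== SOURCE A (Python) =====
-- def UserInputSemanticValidation(objectiveFunction, constraint):
--     import re
--     """
--     Checks whether the input provided by the user is semantically correct or not
--     Arguments:
--         objectiveFunction : String
--         constraint : String
--     Returns:
--         Boolean
--     """
--     constraint = constraint.lower()
--     objectiveFunction = objectiveFunction.lower().split("=")[-1]
--     constraintVariables = ['x' in constraint, 'y' in constraint, 'z' in constraint]
--     objectiveFunctionVariables = ['x' in objectiveFunction, 'y' in objectiveFunction, 'z' in objectiveFunction]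
--     for i in range(len(constraintVariables)):
--         if constraintVariables[i] and not objectiveFunctionVariables[i]: # If a variable is present in the constraint but not in the objective function
--             return False
--     return True
-- ===== SOURCE B (Python) =====
-- def UserInputSemanticValidation(objectiveFunction, constraint):
--     """
--     Semantic check: every variable among x, y, z occurring in the constraint
--     must also occur in the objective function (right-hand side of '=').
--     Single pass over the constraint's characters against a character set of
--     the objective, instead of per-variable membership lists.
--     """
--     objChars = set(objectiveFunction.lower().split("=")[-1])
--     for ch in constraint.lower():
--         if ch in "xyz" and ch not in objChars:
--             return False
--     return True
-- ===== Notes on version B (the rewrite author's own statement) =====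
-- stated objective: alternative
-- what changed: Instead of building index-aligned per-variable membership boolean lists and looping over indices, B iterates once over the constraint's characters, testing each variable character against a character set built from the objective; it traverses the input string rather than the variable list.
import Mathlib
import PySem

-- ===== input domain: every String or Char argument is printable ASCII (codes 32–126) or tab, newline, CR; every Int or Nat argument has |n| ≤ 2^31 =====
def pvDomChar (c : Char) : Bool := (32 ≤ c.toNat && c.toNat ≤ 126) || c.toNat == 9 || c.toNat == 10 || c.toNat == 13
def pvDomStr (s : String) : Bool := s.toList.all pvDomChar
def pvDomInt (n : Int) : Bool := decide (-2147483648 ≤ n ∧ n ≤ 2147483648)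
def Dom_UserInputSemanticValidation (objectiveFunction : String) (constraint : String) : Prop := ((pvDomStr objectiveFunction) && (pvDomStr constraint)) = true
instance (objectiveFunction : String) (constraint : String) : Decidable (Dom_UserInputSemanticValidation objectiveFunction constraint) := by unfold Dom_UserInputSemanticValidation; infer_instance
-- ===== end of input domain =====

-- B replaces A's per-variable membership lists and index loop by one pass over the
-- constraint's characters, checked against a character set of the objective (objective: alternative).

-- ===== PORT A =====
-- the 'for i in range(...)' early-return loop of A
def pvLoopA (cv ov : List Bool) : List Int → Bool
  | [] => true
  | i :: rest =>
      if ((PySem.List.pyGet? cv i).getD false) && !((PySem.List.pyGet? ov i).getD false)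
      then false else pvLoopA cv ov rest

def UserInputSemanticValidation (objectiveFunction : String) (constraint : String) : Bool :=
  let c := PySem.Str.lower constraint
  -- objectiveFunction.lower().split("=")[-1]; the split list is never empty, so [-1] never raises
  let o := (PySem.List.pyGet? ((PySem.Str.split? (PySem.Str.lower objectiveFunction) "=").getD []) (-1)).getD ""
  let constraintVariables := [PySem.Str.isIn "x" c, PySem.Str.isIn "y" c, PySem.Str.isIn "z" c]
  let objectiveFunctionVariables := [PySem.Str.isIn "x" o, PySem.Str.isIn "y" o, PySem.Str.isIn "z" o]
  pvLoopA constraintVariables objectiveFunctionVariables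
    (PySem.List.pyRange 0 (constraintVariables.length) 1)

-- ===== PORT B =====
-- the 'for ch in constraint.lower():' early-return loop of B
def pvScanB (objChars : PySem.Set Char) : List Char → Bool
  | [] => true
  | ch :: rest =>
      if PySem.Chars.isIn [ch] ['x', 'y', 'z'] && !(PySem.Set.contains objChars ch)
      then false else pvScanB objChars rest

def UserInputSemanticValidation_alt (objectiveFunction : String) (constraint : String) : Bool :=
  let o := (PySem.List.pyGet? ((PySem.Str.split? (PySem.Str.lower objectiveFunction) "=").getD []) (-1)).getD ""
  let objChars := PySem.Set.ofList o.toList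
  pvScanB objChars (PySem.Str.lower constraint).toList

-- ===== PRECONDITION & SPEC =====
def Spec_UserInputSemanticValidation (objectiveFunction : String) (constraint : String) (out : Bool) : Prop := out = UserInputSemanticValidation_alt objectiveFunction constraint
instance (objectiveFunction : String) (constraint : String) (out : Bool) : Decidable (Spec_UserInputSemanticValidation objectiveFunction constraint out) := by unfold Spec_UserInputSemanticValidation; infer_instance

-- ===== CLAIM (what is proved, stated in full; the proofs are below) =====
def Claim_equal_UserInputSemanticValidation : Prop := ∀ (objectiveFunction : String) (constraint : String), Dom_UserInputSemanticValidation objectiveFunction constraint → Spec_UserInputSemanticValidation objectiveFunction constraint (UserInputSemanticValidation objectiveFunction constraint)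

-- ===== LEMMAS AND PROOFS =====

-- a singleton membership test 'c in s' is char membership
theorem pvIsInSingle (ch : Char) (s : List Char) :
    PySem.Chars.isIn [ch] s = true ↔ ch ∈ s := by
  rw [PySem.Chars.isIn_iff_infix, List.singleton_infix_iff]

theorem pvStrIsInSingle (ch : Char) (s : String) :
    PySem.Str.isIn (String.ofList [ch]) s = true ↔ ch ∈ s.toList := by
  rw [PySem.Str.isIn_iff_infix]
  simp [List.singleton_infix_iff]

-- A's loop on the fixed index list [0,1,2] is a (guard → guard) conjunction
theorem pvLoopA3 (b1 b2 b3 a1 a2 a3 : Bool) :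
    pvLoopA [b1, b2, b3] [a1, a2, a3] [0, 1, 2]
      = ((!b1 || a1) && (!b2 || a2) && (!b3 || a3)) := by
  cases b1 <;> cases b2 <;> cases b3 <;> cases a1 <;> cases a2 <;> cases a3 <;> rfl

-- B's character scan returns true iff every scanned variable character is in the set
theorem pvScanB_iff (S : PySem.Set Char) (cs : List Char) :
    pvScanB S cs = true ↔
      ∀ ch ∈ cs, ch ∈ (['x', 'y', 'z'] : List Char) → PySem.Set.contains S ch = true := by
  induction cs with
  | nil => simp [pvScanB]
  | cons ch rest ih =>
      unfold pvScanB
      split_ifs with h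
      · simp only [Bool.and_eq_true, Bool.not_eq_true'] at h
        constructor
        · intro hfalse; cases hfalse
        · intro hall
          have := hall ch (List.mem_cons_self ..) ((pvIsInSingle ch _).mp h.1)
          rw [h.2] at this; cases this
      · rw [ih]
        constructor
        · intro hall c hc hv
          rcases List.mem_cons.mp hc with rfl | hc'
          · by_contra hnc
            apply h
            simp only [Bool.and_eq_true, Bool.not_eq_true']
            exact ⟨(pvIsInSingle c _).mpr hv, Bool.eq_false_iff.mpr hnc⟩
          · exact hall c hc' hv
        · intro hall c hc hv; exact hall c (List.mem_cons_of_mem _ hc) hv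

theorem pvRange3 : PySem.List.pyRange 0 3 1 = [0, 1, 2] := by decide

-- ===== VERDICT (by name: the statement is the Claim_ definition above) =====
theorem UserInputSemanticValidation_spec : Claim_equal_UserInputSemanticValidation := by
  intro oF cS _
  unfold Spec_UserInputSemanticValidation UserInputSemanticValidation UserInputSemanticValidation_alt
  simp only [List.length_cons, List.length_nil]
  rw [show (((0 + 1 + 1 + 1 : Nat)) : Int) = 3 by norm_num, pvRange3]
  set c := PySem.Str.lower cS with hc
  set o := (PySem.List.pyGet? ((PySem.Str.split? (PySem.Str.lower oF) "=").getD []) (-1)).getD "" with ho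
  rw [pvLoopA3, Bool.eq_iff_iff, pvScanB_iff]
  simp only [Bool.and_eq_true, Bool.or_eq_true, Bool.not_eq_true', ← Bool.not_eq_true] at *
  constructor
  · intro habc ch hch hv
    rw [PySem.Set.contains_iff, PySem.Set.mem_ofList]
    fin_cases hv
    · rcases habc.1.1 with hb | ha
      · exact absurd ((pvStrIsInSingle 'x' c).mpr hch) (by simpa using hb)
      · exact (pvStrIsInSingle 'x' o).mp ha
    · rcases habc.1.2 with hb | ha
      · exact absurd ((pvStrIsInSingle 'y' c).mpr hch) (by simpa using hb)
      · exact (pvStrIsInSingle 'y' o).mp ha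
    · rcases habc.2 with hb | ha
      · exact absurd ((pvStrIsInSingle 'z' c).mpr hch) (by simpa using hb)
      · exact (pvStrIsInSingle 'z' o).mp ha
  · intro hall
    have key : ∀ ch : Char, ch ∈ (['x', 'y', 'z'] : List Char) →
        (¬ PySem.Str.isIn (String.ofList [ch]) c = true) ∨ PySem.Str.isIn (String.ofList [ch]) o = true := by
      intro ch hv
      by_cases hin : ch ∈ c.toList
      · right
        have := hall ch hin hv
        rw [PySem.Set.contains_iff, PySem.Set.mem_ofList] at this
        exact (pvStrIsInSingle ch o).mpr this
      · left; intro habs; exact hin ((pvStrIsInSingle ch c).mp habs)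
    exact ⟨⟨key 'x' (by decide), key 'y' (by decide)⟩, key 'z' (by decide)⟩
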